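-- pv_equiv track=rewrite | github.com/a-hirota/cu_pg_parquet | benchmark/benchmark_parallel_ctid_ray_chunked_cupy_double_buffer.py | make_ctid_ranges
-- ===== SOURCE A (Python) =====
-- import math
-- from typing import List, Dict, Tuple, Optional
--
-- def make_ctid_ranges(total_blocks: int, parallel_count: int) -> List[Tuple[int, int]]:
--     """ctid範囲リストを生成"""
--     chunk_size = math.ceil(total_blocks / parallel_count)
--     ranges = []
--
--     for i in range(parallel_count):
--         start_block = i * chunk_size
--         end_block = min((i + 1) * chunk_size, total_blocks)
--         if start_block < total_blocks:
--             ranges.append((start_block, end_block))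
--
--     return ranges
-- ===== SOURCE B (Python) =====
-- import math
-- from typing import List, Tuple
--
--
-- def make_ctid_ranges(total_blocks: int, parallel_count: int) -> List[Tuple[int, int]]:
--     """ctid範囲リストを生成 — build the list of chunk boundaries, then pair adjacent ones."""
--     chunk_size = math.ceil(total_blocks / parallel_count)
--     if chunk_size <= 0:
--         return []
--     n_chunks = math.ceil(total_blocks / chunk_size)
--     boundaries = [min(j * chunk_size, total_blocks) for j in range(n_chunks + 1)]
--     return list(zip(boundaries, boundaries[1:]))
-- ===== Notes on version B (the rewrite author's own statement) =====
-- stated objective: alternative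
-- what changed: B replaces A's index loop with a per-index emptiness test by a staged construction: it computes the number of chunks n_chunks = ceil(total_blocks/chunk_size), materialises the list of n_chunks+1 clamped boundary positions, and pairs adjacent boundaries with zip.
import Mathlib
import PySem

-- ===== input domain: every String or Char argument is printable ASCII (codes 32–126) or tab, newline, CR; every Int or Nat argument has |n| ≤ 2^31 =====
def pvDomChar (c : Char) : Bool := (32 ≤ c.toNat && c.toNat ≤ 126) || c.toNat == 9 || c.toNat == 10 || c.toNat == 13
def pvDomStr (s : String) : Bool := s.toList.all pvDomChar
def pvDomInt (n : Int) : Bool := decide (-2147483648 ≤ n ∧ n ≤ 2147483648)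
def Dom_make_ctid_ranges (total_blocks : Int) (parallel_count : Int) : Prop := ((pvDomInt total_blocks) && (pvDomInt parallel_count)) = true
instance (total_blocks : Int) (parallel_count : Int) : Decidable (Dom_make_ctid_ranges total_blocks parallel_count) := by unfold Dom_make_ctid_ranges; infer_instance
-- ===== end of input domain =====

-- B builds the list of chunk boundary positions and pairs adjacent boundaries with zip,
-- instead of looping over chunk indices with a per-index emptiness test; objective: alternative.

-- ===== PORT A =====
-- math.ceil(total_blocks / parallel_count) is ported as exact ceiling division
-- -((-total_blocks) // parallel_count); on Dom (|args| ≤ 2^31) the correctly rounded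
-- float division never crosses an integer boundary, so this is exact.
def make_ctid_ranges (total_blocks : Int) (parallel_count : Int) : List (Int × Int) :=
  let chunk_size := -(PySem.Int.floordiv (-total_blocks) parallel_count)
  let ranges : List (Int × Int) := []
  (PySem.List.pyRange 0 parallel_count 1).foldl
    (fun ranges i =>
      let start_block := i * chunk_size
      let end_block := min ((i + 1) * chunk_size) total_blocks
      if start_block < total_blocks then ranges ++ [(start_block, end_block)] else ranges)
    ranges

-- ===== PORT B =====
-- both math.ceil calls ported as exact ceiling division (exact on Dom, as for A)
def make_ctid_ranges_alt (total_blocks : Int) (parallel_count : Int) : List (Int × Int) :=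
  let chunk_size := -(PySem.Int.floordiv (-total_blocks) parallel_count)
  if chunk_size ≤ 0 then []
  else
    let n_chunks := -(PySem.Int.floordiv (-total_blocks) chunk_size)
    let boundaries := (PySem.List.pyRange 0 (n_chunks + 1) 1).map
      (fun j => min (j * chunk_size) total_blocks)
    boundaries.zip (boundaries.drop 1)

-- ===== PRECONDITION & SPEC =====
-- Pre_ excludes only parallel_count = 0, where Python A raises ZeroDivisionError.
def Pre_make_ctid_ranges (total_blocks : Int) (parallel_count : Int) : Prop := parallel_count ≠ 0
instance (total_blocks : Int) (parallel_count : Int) : Decidable (Pre_make_ctid_ranges total_blocks parallel_count) := by unfold Pre_make_ctid_ranges; infer_instance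
def pvWitness_make_ctid_ranges : Int × Int := (10, 3)

def Spec_make_ctid_ranges (total_blocks : Int) (parallel_count : Int) (out : List (Int × Int)) : Prop := out = make_ctid_ranges_alt total_blocks parallel_count
instance (total_blocks : Int) (parallel_count : Int) (out : List (Int × Int)) : Decidable (Spec_make_ctid_ranges total_blocks parallel_count out) := by unfold Spec_make_ctid_ranges; infer_instance

-- ===== CLAIM (what is proved, stated in full; the proofs are below) =====
def Claim_equal_make_ctid_ranges : Prop := ∀ (total_blocks : Int) (parallel_count : Int), Dom_make_ctid_ranges total_blocks parallel_count → Pre_make_ctid_ranges total_blocks parallel_count → Spec_make_ctid_ranges total_blocks parallel_count (make_ctid_ranges total_blocks parallel_count)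

-- ===== LEMMAS AND PROOFS =====

-- filtering a unit-step range by 'i < n' truncates it at n (when n ≤ b)
lemma filter_lt_pyRange (n : Int) : ∀ (k : Nat) (a b : Int), (b - a).toNat = k → n ≤ b →
    (PySem.List.pyRange a b 1).filter (fun i => decide (i < n)) = PySem.List.pyRange a n 1 := by
  intro k
  induction k with
  | zero =>
    intro a b h hn
    rw [PySem.List.pyRange_one_eq_nil (show b ≤ a by omega),
      PySem.List.pyRange_one_eq_nil (show n ≤ a by omega)]
    simp
  | succ m ih =>
    intro a b h hn
    have hab : a < b := by omega
    rw [PySem.List.pyRange_one_cons hab, List.filter_cons]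
    by_cases han : a < n
    · simp only [han, decide_true, if_true]
      rw [PySem.List.pyRange_one_cons han, ih (a + 1) b (by omega) hn]
    · simp only [han, decide_false, Bool.false_eq_true, if_false]
      rw [PySem.List.pyRange_one_eq_nil (show n ≤ a by omega),
        ih (a + 1) b (by omega) hn,
        PySem.List.pyRange_one_eq_nil (show n ≤ a + 1 by omega)]

-- zipping a mapped unit-step range with its own tail pairs adjacent values
lemma zip_adjacent {α : Type} (g : Int → α) : ∀ (k : Nat) (a b : Int), (b - a).toNat = k →
    ((PySem.List.pyRange a b 1).map g).zip (((PySem.List.pyRange a b 1).map g).drop 1)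
      = (PySem.List.pyRange a (b - 1) 1).map (fun j => (g j, g (j + 1))) := by
  intro k
  induction k with
  | zero =>
    intro a b h
    rw [PySem.List.pyRange_one_eq_nil (show b ≤ a by omega),
      PySem.List.pyRange_one_eq_nil (show b - 1 ≤ a by omega)]
    simp
  | succ m ih =>
    intro a b h
    have hab : a < b := by omega
    rw [PySem.List.pyRange_one_cons hab]
    by_cases h2 : a + 1 < b
    · have hih := ih (a + 1) b (by omega)
      rw [PySem.List.pyRange_one_cons h2] at hih ⊢
      rw [PySem.List.pyRange_one_cons (show a < b - 1 by omega)]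
      simp only [List.map_cons, List.drop_succ_cons, List.drop_zero, List.zip_cons_cons] at hih ⊢
      rw [hih]
    · rw [PySem.List.pyRange_one_eq_nil (show b ≤ a + 1 by omega),
        PySem.List.pyRange_one_eq_nil (show b - 1 ≤ a by omega)]
      simp

-- ===== VERDICT (by name: the statement is the Claim_ definition above) =====
theorem make_ctid_ranges_spec : Claim_equal_make_ctid_ranges := by
  intro tb pc _ hpc
  unfold Spec_make_ctid_ranges make_ctid_ranges make_ctid_ranges_alt
  simp only []
  set cs := -(PySem.Int.floordiv (-tb) pc) with hcs_def
  have hdm := PySem.Int.floordiv_mul_add_mod (-tb) pc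
  rw [PySem.List.foldl_append_ite (fun i => i * cs < tb)
    (fun i => (i * cs, min ((i + 1) * cs) tb)) (PySem.List.pyRange 0 pc 1) []]
  simp only [List.nil_append]
  rcases lt_trichotomy pc 0 with hpcneg | hpc0 | hpcpos
  · -- pc < 0 : A's range is empty; B yields [] either by the guard or because n_chunks ≤ 0
    have hr := PySem.Int.mod_neg_bounds (a := -tb) hpcneg
    rw [PySem.List.pyRange_one_eq_nil (le_of_lt hpcneg)]
    simp only [List.filter_nil, List.map_nil]
    by_cases hg : cs ≤ 0
    · rw [if_pos hg]
    · rw [if_neg hg]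
      rw [not_le] at hg
      have htb : tb < 0 := by nlinarith
      set n := -(PySem.Int.floordiv (-tb) cs) with hn_def
      have hdm2 := PySem.Int.floordiv_mul_add_mod (-tb) cs
      have hr1 := PySem.Int.mod_nonneg (a := -tb) hg
      have hr2 := PySem.Int.mod_lt (a := -tb) hg
      have hn0 : n ≤ 0 := by nlinarith
      rw [zip_adjacent _ ((n + 1) - 0).toNat 0 (n + 1) rfl,
        PySem.List.pyRange_one_eq_nil (show n + 1 - 1 ≤ 0 by omega)]
      simp
  · exact absurd hpc0 hpc
  · -- pc > 0
    have hr1 := PySem.Int.mod_nonneg (a := -tb) hpcpos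
    have hr2 := PySem.Int.mod_lt (a := -tb) hpcpos
    have hub : tb ≤ cs * pc := by nlinarith
    by_cases hg : cs ≤ 0
    · -- total_blocks ≤ 0 : both sides empty
      rw [if_pos hg]
      have hnil : ((PySem.List.pyRange 0 pc 1).filter (fun i => decide (i * cs < tb))) = [] := by
        apply List.filter_eq_nil_iff.mpr
        intro i hi
        have hbd := (PySem.List.mem_pyRange_one).mp hi
        simp only [decide_eq_true_eq, not_lt]
        nlinarith [mul_le_mul_of_nonpos_right (show i ≤ pc by omega) hg]
      rw [hnil, List.map_nil]
    · rw [if_neg hg]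
      rw [not_le] at hg
      set n := -(PySem.Int.floordiv (-tb) cs) with hn_def
      have hdm2 := PySem.Int.floordiv_mul_add_mod (-tb) cs
      have hs1 := PySem.Int.mod_nonneg (a := -tb) hg
      have hs2 := PySem.Int.mod_lt (a := -tb) hg
      have hlow : tb ≤ n * cs := by nlinarith
      have hhigh : n * cs < tb + cs := by nlinarith
      have hnpc : n ≤ pc := by nlinarith
      have hiff : ∀ i : Int, (decide (i * cs < tb)) = (decide (i < n)) := by
        intro i
        rcases lt_or_ge i n with h | h
        · simp only [h, decide_true, decide_eq_true_eq]
          nlinarith [mul_le_mul_of_nonneg_right (show i ≤ n - 1 by omega) (le_of_lt hg)]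
        · have : ¬ i * cs < tb := by
            have := mul_le_mul_of_nonneg_right h (le_of_lt hg)
            omega
          simp [this, show ¬ i < n by omega]
      rw [List.filter_congr (fun i _ => hiff i),
        filter_lt_pyRange n (pc - 0).toNat 0 pc rfl hnpc,
        zip_adjacent _ ((n + 1) - 0).toNat 0 (n + 1) rfl,
        show n + 1 - 1 = n from by omega]
      apply List.map_congr_left
      intro j hj
      have hbd := (PySem.List.mem_pyRange_one).mp hj
      have hjcs : j * cs < tb := by
        nlinarith [mul_le_mul_of_nonneg_right (show j ≤ n - 1 by omega) (le_of_lt hg)]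
      rw [min_eq_left (le_of_lt hjcs)]
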